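-- pv_equiv track=rewrite | github.com/kyjimmy/Bioinformatics | dna_assembly.py | SubstractDegree
-- ===== SOURCE A (Python) =====
-- from collections import Counter
--
-- def SubstractDegree(graph):
--     # Calculate the difference between in-degree and out-degree of a node
--     graph_in= []
--     graph_out = {}
--     for key, val in graph.items():
--         graph_in.extend(val)
--         graph_out[key] = len(val)
--     graph_in = dict(Counter(graph_in))
--     subdict = {key: graph_out[key] - graph_in.get(key, 0) for key in graph_out}
--     for key,i in subdict.items():
--          if i==1: location = key
--     return location
-- ===== SOURCE B (Python) =====
-- def SubstractDegree(graph):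
--     # For each node of the graph (in key order), compare its out-degree with the
--     # number of times it appears as a target anywhere; keep the last node whose
--     # difference is 1.  No dicts/counters needed.
--     for key, val in graph.items():
--         if len(val) - sum(vs.count(key) for vs in graph.values()) == 1:
--             location = key
--     return location
-- ===== Notes on version B (the rewrite author's own statement) =====
-- stated objective: simpler
-- what changed: Replaces A's three intermediate tables (out-degree dict, Counter of all targets, difference dict) with a single scan over the graph items that computes each node's out-degree minus in-degree on the fly via nested counting.
import Mathlib
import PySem

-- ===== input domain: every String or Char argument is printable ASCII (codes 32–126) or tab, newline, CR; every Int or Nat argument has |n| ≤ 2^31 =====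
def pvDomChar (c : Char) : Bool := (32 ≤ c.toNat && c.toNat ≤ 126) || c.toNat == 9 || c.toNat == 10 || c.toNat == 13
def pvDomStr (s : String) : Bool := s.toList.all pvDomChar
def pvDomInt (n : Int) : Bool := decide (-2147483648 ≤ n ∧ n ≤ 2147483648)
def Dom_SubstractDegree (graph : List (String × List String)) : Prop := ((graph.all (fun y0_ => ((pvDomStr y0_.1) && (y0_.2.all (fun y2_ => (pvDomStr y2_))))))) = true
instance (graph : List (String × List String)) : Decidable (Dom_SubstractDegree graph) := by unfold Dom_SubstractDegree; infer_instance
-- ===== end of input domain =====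

-- B replaces A's three intermediate dicts (out-degree table, Counter of targets, difference
-- dict) by a direct scan that computes each node's degree difference on the fly: simpler, not faster.
-- Both ports first collapse the association list with PySem.Dict.ofList, since the Python
-- argument is a dict (duplicate keys cannot occur there; last value wins, first position kept).

-- ===== PORT A =====
def SubstractDegree (graph : List (String × List String)) : String :=
  let g := (PySem.Dict.ofList graph).items
  -- graph_in = []; graph_out = {}; for key, val in graph.items(): graph_in.extend(val); graph_out[key] = len(val)
  let graph_in : List String := g.foldl (fun acc kv => acc ++ kv.2) []
  let graph_out : PySem.Dict String Int :=
    g.foldl (fun d kv => d.insert kv.1 (PySem.List.len kv.2)) PySem.Dict.empty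
  -- graph_in = dict(Counter(graph_in))
  let graph_in_d : PySem.Dict String Int := PySem.Dict.counter graph_in
  -- subdict = {key: graph_out[key] - graph_in.get(key, 0) for key in graph_out}
  let subdict : PySem.Dict String Int :=
    PySem.Dict.ofList (graph_out.keys.map (fun k => (k, graph_out.getD k 0 - graph_in_d.getD k 0)))
  -- for key,i in subdict.items(): if i==1: location = key
  let location : Option String :=
    subdict.items.foldl (fun loc ki => if ki.2 == 1 then some ki.1 else loc) none
  location.getD ""   -- Pre_ guarantees a match; Python raises NameError otherwise

-- ===== PORT B =====
def SubstractDegree_alt (graph : List (String × List String)) : String :=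
  let g := PySem.Dict.ofList graph
  -- for key, val in graph.items(): if len(val) - sum(vs.count(key) for vs in graph.values()) == 1: location = key
  let location : Option String :=
    g.items.foldl (fun loc kv =>
      if PySem.List.len kv.2 - (g.values.map (fun vs => (PySem.List.count vs kv.1 : Int))).sum == 1
      then some kv.1 else loc) none
  location.getD ""

-- ===== PRECONDITION & SPEC =====
-- Pre_ excludes exactly the graphs in which no node has out-degree minus in-degree equal to 1:
-- there both Pythons never assign 'location' and raise NameError instead of returning.
def Pre_SubstractDegree (graph : List (String × List String)) : Prop :=
  ∃ kv ∈ (PySem.Dict.ofList graph).items,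
    PySem.List.len kv.2
      - ((PySem.Dict.ofList graph).values.map (fun vs => (PySem.List.count vs kv.1 : Int))).sum = 1
instance (graph : List (String × List String)) : Decidable (Pre_SubstractDegree graph) := by
  unfold Pre_SubstractDegree; infer_instance

def pvWitness_SubstractDegree : (List (String × List String)) := [("a", ["b"]), ("b", [])]

def Spec_SubstractDegree (graph : List (String × List String)) (out : String) : Prop := out = SubstractDegree_alt graph
instance (graph : List (String × List String)) (out : String) : Decidable (Spec_SubstractDegree graph out) := by unfold Spec_SubstractDegree; infer_instance

-- ===== CLAIM (what is proved, stated in full; the proofs are below) =====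
def Claim_equal_SubstractDegree : Prop := ∀ (graph : List (String × List String)), Dom_SubstractDegree graph → Pre_SubstractDegree graph → Spec_SubstractDegree graph (SubstractDegree graph)

-- ===== LEMMAS AND PROOFS =====

-- out-degree table built by A: its items are just the pairs (key, len val), keys kept unique
theorem graph_out_items (l : List (String × List String)) (hn : (l.map Prod.fst).Nodup) :
    (l.foldl (fun d kv => d.insert kv.1 (PySem.List.len kv.2)) PySem.Dict.empty).items
      = l.map (fun kv => (kv.1, PySem.List.len kv.2)) := by
  simpa using PySem.Dict.items_foldl_insert_fresh l Prod.fst (fun kv => PySem.List.len kv.2)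
    PySem.Dict.empty (by intro a _; simp [PySem.Dict.contains_empty]) hn

-- a dict built from pairs with distinct keys keeps exactly those pairs
theorem items_ofList_nodup (pairs : List (String × Int)) (h : (pairs.map Prod.fst).Nodup) :
    (PySem.Dict.ofList pairs).items = pairs := by
  simpa using PySem.Dict.items_foldl_insert_fresh pairs Prod.fst Prod.snd PySem.Dict.empty
    (by intro a _; simp [PySem.Dict.contains_empty]) h

-- A's body = B's body on any items list with pairwise-distinct keys
theorem core_eq (l : List (String × List String)) (hn : (l.map Prod.fst).Nodup) :
    ((PySem.Dict.ofList
        ((l.foldl (fun d kv => d.insert kv.1 (PySem.List.len kv.2)) PySem.Dict.empty).keys.map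
          (fun k => (k, (l.foldl (fun d kv => d.insert kv.1 (PySem.List.len kv.2)) PySem.Dict.empty).getD k 0
            - (PySem.Dict.counter (l.foldl (fun acc kv => acc ++ kv.2) ([] : List String))).getD k 0)))).items.foldl
        (fun loc ki => if ki.2 == 1 then some ki.1 else loc) none).getD ""
    = (l.foldl (fun loc kv =>
        if PySem.List.len kv.2
            - ((l.map (fun p => p.2)).map (fun vs => (PySem.List.count vs kv.1 : Int))).sum == 1
          then some kv.1 else loc) none).getD "" := by
  have hitems := graph_out_items l hn
  have hkeys : (l.foldl (fun d kv => d.insert kv.1 (PySem.List.len kv.2)) PySem.Dict.empty).keys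
      = l.map Prod.fst := by
    show ((l.foldl (fun d kv => d.insert kv.1 (PySem.List.len kv.2)) PySem.Dict.empty).items.map (fun p => p.1))
        = l.map Prod.fst
    rw [hitems, List.map_map]; rfl
  rw [hkeys, List.map_map]
  rw [items_ofList_nodup _ (by simpa [List.map_map, Function.comp] using hn)]
  rw [List.foldl_map]
  congr 1
  apply PySem.List.foldl_congr_mem
  intro acc kv hkv
  have h1 : (l.foldl (fun d kv => d.insert kv.1 (PySem.List.len kv.2)) PySem.Dict.empty).getD kv.1 0
      = PySem.List.len kv.2 := by
    apply PySem.Dict.getD_of_mem_items _ _ _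
    · rw [hitems]; exact List.mem_map_of_mem hkv
    · show ((l.foldl (fun d kv => d.insert kv.1 (PySem.List.len kv.2)) PySem.Dict.empty).items.map (fun p => p.1)).Nodup
      rw [hitems, List.map_map]; simpa [Function.comp] using hn
  have hflat : l.foldl (fun acc kv => acc ++ kv.2) ([] : List String)
      = List.flatMap (fun kv => kv.2) l := by
    simpa using PySem.List.foldl_append_eq_flatMap (fun kv => kv.2) l []
  have h2 : (PySem.Dict.counter (l.foldl (fun acc kv => acc ++ kv.2) ([] : List String))).getD kv.1 0
      = ((l.map (fun p => p.2)).map (fun vs => (PySem.List.count vs kv.1 : Int))).sum := by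
    rw [PySem.Dict.getD_counter, hflat]
    have hc : List.count kv.1 (List.flatMap (fun kv => kv.2) l)
        = ((l.map (fun p => p.2)).map (List.count kv.1)).sum := by
      rw [List.flatMap_def, List.count_flatten]
    rw [hc]; push_cast [List.map_map]; rfl
  simp only [Function.comp, h1, h2]

theorem SubstractDegree_eq (graph : List (String × List String)) :
    SubstractDegree graph = SubstractDegree_alt graph := by
  exact core_eq (PySem.Dict.ofList graph).items (PySem.Dict.nodup_keys_ofList graph)

-- ===== VERDICT (by name: the statement is the Claim_ definition above) =====
theorem SubstractDegree_spec : Claim_equal_SubstractDegree := by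
  intro graph _ _
  exact SubstractDegree_eq graph
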